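-- pv_equiv track=rewrite | github.com/dheerajitgithub/Job-board | candidate/client/utils/cv_score.py | hardskill_matcher
-- ===== SOURCE A (Python) =====
-- def ngrams(input, n):
--     input = input.split(' ')
--     output = []
--     for i in range(len(input)-n+1):
--         output.append(input[i:i+n])
--     return output
--
-- def hardskill_matcher(text, hs_extracted_dict):
--     text =  text.lower()
--     hardskill_list = []
--     text_ngrams = []
--     n = 6
--     ## here we are storing the ngrams data into the list - 1 gram to 6 gram data is stored.
--     for i in range(1, n+1):
--         ngram = [' '.join(x) for x in ngrams(text, i)]
--         text_ngrams = text_ngrams+ngram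
--
--
--     for i in text_ngrams:
--         try:
--             skill_alpha_dict = hs_extracted_dict[i[0].lower()] # Get the first character
--             for j in skill_alpha_dict.keys():
--                 if i in skill_alpha_dict[j]:
--                     hardskill_list.append(j)
--                 # else:
--                 #     skill_misc = hs_extracted_dict['#misc'] # Look in miscellaneous dictionary
--                 #     for k in skill_misc.keys():
--                 #         if i in skill_misc[k]:
--                 #             hardskill_list.append(k)
--
--         except Exception as e1:
--             pass
--     return list(set(hardskill_list))
-- ===== SOURCE B (Python) =====
-- def hardskill_matcher(text, hs_extracted_dict):
--     text = text.lower()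
--     # Build a reverse index phrase -> ordered list of distinct skills once,
--     # keeping only phrases filed under the alpha bucket named by their first character.
--     index = {}
--     for alpha, skill_dict in hs_extracted_dict.items():
--         for skill, phrases in skill_dict.items():
--             for p in phrases:
--                 if p and p[0].lower() == alpha:
--                     skills = index.setdefault(p, [])
--                     if skill not in skills:
--                         skills.append(skill)
--     words = text.split(' ')
--     found = []
--     for n in range(1, 7):
--         for i in range(len(words) - n + 1):
--             g = ' '.join(words[i:i + n])
--             for skill in index.get(g, ()):
--                 if skill not in found:
--                     found.append(skill)
--     return found
-- ===== Notes on version B (the rewrite author's own statement) =====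
-- stated objective: alternative
-- what changed: B precomputes a reverse index phrase->distinct-skills once (respecting each phrase's first-character bucket) and then does one dict lookup per n-gram, instead of A's per-n-gram scan over every skill's phrase list; the Lean precondition only excludes association lists with duplicate outer or inner keys, which cannot arise from A's Python dict parameter (dict keys are unique), so no actual Python input is excluded.
import Mathlib
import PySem

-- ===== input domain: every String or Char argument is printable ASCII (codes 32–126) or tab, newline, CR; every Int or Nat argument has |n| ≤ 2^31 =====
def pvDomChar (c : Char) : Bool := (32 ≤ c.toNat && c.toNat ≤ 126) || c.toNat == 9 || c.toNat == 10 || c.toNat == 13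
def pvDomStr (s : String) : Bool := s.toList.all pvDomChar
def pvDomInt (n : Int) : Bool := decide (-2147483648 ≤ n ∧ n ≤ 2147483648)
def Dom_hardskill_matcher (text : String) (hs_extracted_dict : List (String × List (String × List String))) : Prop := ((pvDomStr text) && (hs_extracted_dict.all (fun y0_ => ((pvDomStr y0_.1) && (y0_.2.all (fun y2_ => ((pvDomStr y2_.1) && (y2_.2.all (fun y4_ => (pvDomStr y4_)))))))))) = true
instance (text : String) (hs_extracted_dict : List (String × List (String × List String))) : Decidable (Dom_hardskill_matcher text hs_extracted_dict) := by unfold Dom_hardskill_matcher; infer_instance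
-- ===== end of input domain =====

-- B replaces A's per-n-gram scan over every skill's phrase list by a reverse index
-- phrase -> distinct skills built once, then one dict lookup per n-gram (alternative algorithm).
-- A's `list(set(...))` has hash order in Python; outputs are compared as sets.

-- ===== PORT A =====
-- ngrams(input, n): input.split(' '); output.append(input[i:i+n]) for i in range(len(input)-n+1)
def pvNgramsA (input : String) (n : Int) : List (List String) :=
  let inputw := (PySem.Str.split? input " ").getD []   -- sep " " ≠ "", split? is never none
  (PySem.List.pyRange 0 ((inputw.length : Int) - n + 1) 1).map
    (fun i => PySem.List.slice inputw (some i) (some (i + n)))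

def hardskill_matcher (text : String) (hs_extracted_dict : List (String × List (String × List String))) : List String :=
  let textl := PySem.Str.lower text
  -- for i in range(1, 7): text_ngrams = text_ngrams + [' '.join(x) for x in ngrams(text, i)]
  let text_ngrams := (PySem.List.pyRange 1 7 1).foldl
    (fun acc i => acc ++ (pvNgramsA textl i).map (fun x => PySem.Str.join " " x)) []
  let hardskill_list := text_ngrams.foldl (fun acc i =>
    match PySem.Str.pyGet? i 0 with
    | none => acc            -- i[0] raises IndexError, swallowed by `except: pass`
    | some c =>
      match (PySem.Dict.mk hs_extracted_dict).get? (PySem.Str.lower (String.ofList [c])) with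
      | none => acc          -- KeyError, swallowed by `except: pass`
      | some sad =>
        -- for j in skill_alpha_dict.keys(): if i in skill_alpha_dict[j]: hardskill_list.append(j)
        ((PySem.Dict.mk sad).keys).foldl
          (fun acc2 j =>
            if ((PySem.Dict.mk sad).getD j []).contains i then acc2 ++ [j] else acc2)
          acc) []
  PySem.Set.ofList hardskill_list   -- list(set(hardskill_list)); output is compared as a set

-- ===== PORT B =====
def hardskill_matcher_alt (text : String) (hs_extracted_dict : List (String × List (String × List String))) : List String :=
  let textl := PySem.Str.lower text
  -- reverse index phrase -> ordered list of distinct skills, built once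
  -- (`index.setdefault(p, [])` + conditional append = Dict.modify p [] with a guarded append)
  let index : PySem.Dict String (List String) := hs_extracted_dict.foldl (fun d ab =>
    ab.2.foldl (fun d sp =>
      sp.2.foldl (fun d p =>
        match PySem.Str.pyGet? p 0 with
        | none => d            -- `if p` fails: empty phrase, skipped
        | some c =>
          if PySem.Str.lower (String.ofList [c]) == ab.1 then
            d.modify p [] (fun sk => if sk.contains sp.1 then sk else sk ++ [sp.1])
          else d) d) d) PySem.Dict.empty
  let words := (PySem.Str.split? textl " ").getD []   -- sep " " ≠ "", split? is never none
  (PySem.List.pyRange 1 7 1).foldl (fun found n =>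
    (PySem.List.pyRange 0 ((words.length : Int) - n + 1) 1).foldl (fun found i =>
      (index.getD (PySem.Str.join " " (PySem.List.slice words (some i) (some (i + n)))) []).foldl
        PySem.Set.add found)     -- `if skill not in found: found.append(skill)`
      found) []

-- ===== PRECONDITION & SPEC =====
-- Pre_ excludes only association lists with duplicate outer or inner keys: they do not arise
-- from a Python dict (A's parameter is a dict, whose keys are necessarily unique), and on them
-- first-vs-last-match behaviour of the encoding is accidental.
def Pre_hardskill_matcher (text : String) (hs_extracted_dict : List (String × List (String × List String))) : Prop :=
  (hs_extracted_dict.map Prod.fst).Nodup ∧ ∀ b ∈ hs_extracted_dict, (b.2.map Prod.fst).Nodup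
instance (text : String) (hs_extracted_dict : List (String × List (String × List String))) : Decidable (Pre_hardskill_matcher text hs_extracted_dict) := by unfold Pre_hardskill_matcher; infer_instance

def pvWitness_hardskill_matcher : String × (List (String × List (String × List String))) :=
  ("I use Python and sql daily", [("p", [("Python", ["python", "python dev"])]), ("s", [("SQL", ["sql"])])])

def Spec_hardskill_matcher (text : String) (hs_extracted_dict : List (String × List (String × List String))) (out : List String) : Prop := out = hardskill_matcher_alt text hs_extracted_dict
instance (text : String) (hs_extracted_dict : List (String × List (String × List String))) (out : List String) : Decidable (Spec_hardskill_matcher text hs_extracted_dict out) := by unfold Spec_hardskill_matcher; infer_instance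

-- ===== CLAIM (what is proved, stated in full; the proofs are below) =====
def Claim_equal_hardskill_matcher : Prop := ∀ (text : String) (hs_extracted_dict : List (String × List (String × List String))), Dom_hardskill_matcher text hs_extracted_dict → Pre_hardskill_matcher text hs_extracted_dict → Spec_hardskill_matcher text hs_extracted_dict (hardskill_matcher text hs_extracted_dict)

-- ===== LEMMAS AND PROOFS =====

def pvKey? (s : String) : Option String :=
  (PySem.Str.pyGet? s 0).map (fun c => PySem.Str.lower (String.ofList [c]))

def pvPerG (hs : List (String × List (String × List String))) (g : String) : List String :=
  match pvKey? g with
  | none => []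
  | some k =>
    match (PySem.Dict.mk hs).get? k with
    | none => []
    | some sad => (sad.filter (fun pr => pr.2.contains g)).map Prod.fst

def pvGs (words : List String) : List String :=
  (PySem.List.pyRange 1 7 1).flatMap (fun n =>
    (PySem.List.pyRange 0 ((words.length : Int) - n + 1) 1).map
      (fun i => PySem.Str.join " " (PySem.List.slice words (some i) (some (i + n)))))

def pvStepP (a j : String) (d : PySem.Dict String (List String)) (p : String) : PySem.Dict String (List String) :=
  match PySem.Str.pyGet? p 0 with
  | none => d
  | some c =>
    if PySem.Str.lower (String.ofList [c]) == a then
      d.modify p [] (fun sk => if sk.contains j then sk else sk ++ [j])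
    else d

def pvStepB (a : String) (d : PySem.Dict String (List String)) (sp : String × List String) : PySem.Dict String (List String) :=
  sp.2.foldl (pvStepP a sp.1) d

def pvCond (a s : String) : Bool :=
  match pvKey? s with
  | none => false
  | some k => k == a

theorem pvStepP_eq (a j : String) (d : PySem.Dict String (List String)) (p : String) :
    pvStepP a j d p = if pvCond a p then d.modify p [] (fun sk => PySem.Set.add sk j) else d := by
  unfold pvStepP pvCond pvKey? PySem.Set.add
  cases PySem.Str.pyGet? p 0 <;> simp

theorem pvL1 (a j g : String) (ps : List String) (d : PySem.Dict String (List String)) :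
    ((ps.foldl (pvStepP a j) d).getD g []) =
      if pvCond a g ∧ g ∈ ps then PySem.Set.add (d.getD g []) j else d.getD g [] := by
  induction ps generalizing d with
  | nil => simp
  | cons p t ih =>
    simp only [List.foldl_cons, ih, pvStepP_eq]
    by_cases hpg : p = g
    · subst hpg
      by_cases hc : pvCond a p
      · simp [hc, PySem.Dict.getD_modify_self]
      · simp [hc]
    · have hne : g ≠ p := fun h => hpg h.symm
      by_cases hc : pvCond a p
      · simp [hc, PySem.Dict.getD_modify_of_ne _ _ _ hne]
        by_cases hm : g ∈ t <;> simp [hm, hne]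
      · simp [hc]
        by_cases hm : g ∈ t <;> simp [hm, hne]

theorem pvL2' (a g : String) (b : List (String × List String)) (d : PySem.Dict String (List String))
    (hc : pvCond a g = false) :
    ((b.foldl (pvStepB a) d).getD g []) = d.getD g [] := by
  induction b generalizing d with
  | nil => rfl
  | cons sp t ih => simp [List.foldl_cons, ih, pvStepB, pvL1, hc]

theorem pvL2 (a g : String) (b : List (String × List String)) (d : PySem.Dict String (List String))
    (hc : pvCond a g = true) (hnd : (b.map Prod.fst).Nodup)
    (hdisj : ∀ j ∈ b.map Prod.fst, j ∉ d.getD g []) :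
    ((b.foldl (pvStepB a) d).getD g []) =
      d.getD g [] ++ (b.filter (fun pr => pr.2.contains g)).map Prod.fst := by
  induction b generalizing d with
  | nil => simp
  | cons sp t ih =>
    simp only [List.map_cons, List.nodup_cons] at hnd hdisj
    have hd1 : sp.1 ∉ d.getD g [] := hdisj sp.1 (by simp)
    by_cases hm : g ∈ sp.2
    · have hstep : (pvStepB a d sp).getD g [] = d.getD g [] ++ [sp.1] := by
        simp [pvStepB, pvL1, hc, hm, PySem.Set.add, PySem.Set.contains, hd1]
      rw [List.foldl_cons, ih (pvStepB a d sp) hnd.2 ?_]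
      · rw [hstep]
        simp [hm]
      · intro j hj
        rw [hstep]
        simp only [List.mem_append, List.mem_singleton]
        rintro (h | h)
        · exact hdisj j (List.mem_cons_of_mem _ hj) h
        · exact hnd.1 (h ▸ hj)
    · have hstep : (pvStepB a d sp).getD g [] = d.getD g [] := by
        simp [pvStepB, pvL1, hc, hm]
      rw [List.foldl_cons, ih (pvStepB a d sp) hnd.2 (by rw [hstep]; intro j hj; exact hdisj j (List.mem_cons_of_mem _ hj)), hstep]
      simp [hm]

theorem pvL4 (g : String) (t : List (String × List (String × List String)))
    (d : PySem.Dict String (List String)) (h : ∀ ab ∈ t, pvCond ab.1 g = false) :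
    ((t.foldl (fun d ab => ab.2.foldl (pvStepB ab.1) d) d).getD g []) = d.getD g [] := by
  induction t generalizing d with
  | nil => rfl
  | cons ab t ih =>
    rw [List.foldl_cons, ih _ (fun x hx => h x (List.mem_cons_of_mem _ hx)),
      pvL2' ab.1 g ab.2 d (h ab (by simp))]

theorem pvL3aux (g k : String) (hk : pvKey? g = some k)
    (hs : List (String × List (String × List String))) (d : PySem.Dict String (List String))
    (h1 : (hs.map Prod.fst).Nodup) (h2 : ∀ b ∈ hs, (b.2.map Prod.fst).Nodup)
    (hd : d.getD g [] = []) :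
    ((hs.foldl (fun d ab => ab.2.foldl (pvStepB ab.1) d) d).getD g []) =
      (match (PySem.Dict.mk hs).get? k with
       | none => []
       | some sad => (sad.filter (fun pr => pr.2.contains g)).map Prod.fst) := by
  induction hs generalizing d with
  | nil => simpa [PySem.Dict.get?] using hd
  | cons ab t ih =>
    simp only [List.map_cons, List.nodup_cons] at h1
    by_cases hak : ab.1 = k
    · rw [List.foldl_cons, pvL4 g t _ ?_, pvL2 ab.1 g ab.2 d (by simp [pvCond, hk, hak]) (h2 ab (by simp)) (by simp [hd]), hd]
      · have : (PySem.Dict.mk (ab :: t)).get? k = some ab.2 := by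
          obtain ⟨a1, a2⟩ := ab
          simp at hak
          simp [PySem.Dict.get?_mk_cons, hak]
        rw [this]
        simp
      · intro x hx
        have hxk : x.1 ≠ k := by
          intro hxe
          exact h1.1 (hak ▸ hxe ▸ List.mem_map_of_mem hx)
        simp [pvCond, hk]
        exact fun h => hxk h.symm
    · rw [List.foldl_cons]
      rw [ih (ab.2.foldl (pvStepB ab.1) d) h1.2 (fun b hb => h2 b (List.mem_cons_of_mem _ hb))
        (by rw [pvL2' ab.1 g ab.2 d (by simp [pvCond, hk]; exact fun h => hak h.symm)]; exact hd)]
      obtain ⟨a1, a2⟩ := ab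
      simp at hak
      simp [PySem.Dict.get?_mk_cons, hak]

theorem pvL3 (g : String) (hs : List (String × List (String × List String)))
    (h1 : (hs.map Prod.fst).Nodup) (h2 : ∀ b ∈ hs, (b.2.map Prod.fst).Nodup) :
    ((hs.foldl (fun d ab => ab.2.foldl (pvStepB ab.1) d) PySem.Dict.empty).getD g []) = pvPerG hs g := by
  unfold pvPerG
  cases hk : pvKey? g with
  | none =>
    have : ∀ ab ∈ hs, pvCond ab.1 g = false := by intro ab _; simp [pvCond, hk]
    rw [pvL4 g hs _ this]
    rfl
  | some k => exact pvL3aux g k hk hs PySem.Dict.empty h1 h2 rfl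

theorem pvAbody (hs : List (String × List (String × List String)))
    (h2 : ∀ b ∈ hs, (b.2.map Prod.fst).Nodup) (acc : List String) (g : String) :
    (match PySem.Str.pyGet? g 0 with
     | none => acc
     | some c =>
       match (PySem.Dict.mk hs).get? (PySem.Str.lower (String.ofList [c])) with
       | none => acc
       | some sad =>
         ((PySem.Dict.mk sad).keys).foldl
           (fun acc2 j =>
             if ((PySem.Dict.mk sad).getD j []).contains g then acc2 ++ [j] else acc2)
           acc) = acc ++ pvPerG hs g := by
  unfold pvPerG pvKey?
  cases hg0 : PySem.Str.pyGet? g 0 with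
  | none => simp
  | some c =>
    simp only [Option.map_some]
    cases hget : (PySem.Dict.mk hs).get? (PySem.Str.lower (String.ofList [c])) with
    | none => simp
    | some sad =>
      simp only []
      have hmem : (PySem.Str.lower (String.ofList [c]), sad) ∈ hs :=
        by exact PySem.Dict.mem_items_of_get?_eq_some _ hget
      have hnd : (sad.map Prod.fst).Nodup := h2 _ hmem
      have hkeys : (PySem.Dict.mk sad).keys = sad.map Prod.fst := rfl
      rw [hkeys, List.foldl_map]
      have hrw := PySem.List.foldl_congr_mem
        (f := fun acc2 (pr : String × List String) =>
          if ((PySem.Dict.mk sad).getD pr.1 []).contains g then acc2 ++ [pr.1] else acc2)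
        (g := fun acc2 (pr : String × List String) =>
          if (pr.2).contains g then acc2 ++ [pr.1] else acc2)
        (l := sad) (init := acc) ?_
      · rw [hrw]
        exact PySem.List.foldl_append_if (fun pr => pr.2.contains g) Prod.fst sad acc
      · rintro a ⟨k1, v1⟩ hx
        simp only []
        rw [PySem.Dict.getD_of_mem_items (PySem.Dict.mk sad) hx hnd []]

theorem pvA_eq (text : String) (hs : List (String × List (String × List String)))
    (h2 : ∀ b ∈ hs, (b.2.map Prod.fst).Nodup) :
    hardskill_matcher text hs =
      PySem.Set.ofList ((pvGs ((PySem.Str.split? (PySem.Str.lower text) " ").getD [])).flatMap (pvPerG hs)) := by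
  have h1 : ((PySem.List.pyRange 1 7 1).foldl
      (fun acc i => acc ++ (pvNgramsA (PySem.Str.lower text) i).map (fun x => PySem.Str.join " " x)) []) =
      pvGs ((PySem.Str.split? (PySem.Str.lower text) " ").getD []) := by
    rw [PySem.List.foldl_append_eq_flatMap]
    simp only [pvGs, pvNgramsA, List.map_map, List.nil_append]
    rfl
  simp only [hardskill_matcher]
  rw [h1]
  apply congrArg
  rw [show (fun (acc : List String) (i : String) =>
      (match PySem.Str.pyGet? i 0 with
       | none => acc
       | some c =>
         match (PySem.Dict.mk hs).get? (PySem.Str.lower (String.ofList [c])) with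
         | none => acc
         | some sad =>
           ((PySem.Dict.mk sad).keys).foldl
             (fun acc2 j =>
               if ((PySem.Dict.mk sad).getD j []).contains i then acc2 ++ [j] else acc2)
             acc)) = fun acc g => acc ++ pvPerG hs g from funext₂ (pvAbody hs h2)]
  rw [PySem.List.foldl_append_eq_flatMap]
  simp

theorem pvB_eq (text : String) (hs : List (String × List (String × List String))) :
    hardskill_matcher_alt text hs =
      ((pvGs ((PySem.Str.split? (PySem.Str.lower text) " ").getD [])).flatMap
        (fun g => (hs.foldl (fun d ab => ab.2.foldl (pvStepB ab.1) d) PySem.Dict.empty).getD g [])).foldl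
        PySem.Set.add [] := by
  simp only [hardskill_matcher_alt, pvGs]
  simp only [List.foldl_flatMap, List.foldl_map]
  rfl

-- ===== VERDICT (by name: the statement is the Claim_ definition above) =====
theorem hardskill_matcher_spec : Claim_equal_hardskill_matcher := by
  intro text hs _hdom hpre
  obtain ⟨h1, h2⟩ := hpre
  unfold Spec_hardskill_matcher
  rw [pvA_eq text hs h2, pvB_eq text hs, PySem.Set.ofList_eq_foldl]
  have hfun : (fun g => (hs.foldl (fun d ab => ab.2.foldl (pvStepB ab.1) d) PySem.Dict.empty).getD g []) = pvPerG hs :=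
    funext fun g => pvL3 g hs h1 h2
  rw [hfun]
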